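-- pv_equiv track=rewrite | github.com/Time-Coder/Glass-Engine | glass/utils.py | rskip_space
-- ===== SOURCE A (Python) =====
-- def rskip_space(content, i):
--     if i < 0 or i >= len(content):
--         return -1
--
--     while True:
--         if i < 0 or content[i] not in " \t\r.":
--             break
--         i -= 1
--
--     return i
-- ===== SOURCE B (Python) =====
-- def rskip_space(content, i):
--     if i < 0 or i >= len(content):
--         return -1
--     return len(content[:i+1].rstrip(" \t\r.")) - 1
-- ===== Notes on version B (the rewrite author's own statement) =====
-- stated objective: simpler
-- what changed: Replaces the manual backward index-decrement loop with a closed form: slice the prefix content[:i+1], rstrip the skip characters ' \t\r.', and return the remaining length minus one.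
import Mathlib
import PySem

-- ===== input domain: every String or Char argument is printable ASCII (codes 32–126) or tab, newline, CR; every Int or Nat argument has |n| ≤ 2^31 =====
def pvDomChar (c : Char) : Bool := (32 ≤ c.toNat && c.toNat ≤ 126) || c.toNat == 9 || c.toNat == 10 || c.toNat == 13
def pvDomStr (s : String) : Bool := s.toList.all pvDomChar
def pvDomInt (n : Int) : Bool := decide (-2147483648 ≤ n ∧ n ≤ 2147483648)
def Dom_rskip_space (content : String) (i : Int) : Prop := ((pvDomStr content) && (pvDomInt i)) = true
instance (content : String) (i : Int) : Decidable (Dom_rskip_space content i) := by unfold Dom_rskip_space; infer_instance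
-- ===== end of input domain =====

-- B replaces A's backward index-decrement loop with a closed form (prefix slice, rstrip of the skip chars, length - 1); objective: simpler.

-- ===== PORT A =====
-- the while loop: break when i < 0 or content[i] not in " \t\r.", else i -= 1
-- (pyGet? = none, Python's IndexError, is unreachable: the caller guarantees i < len and i only decreases)
def rskipLoop (cs : List Char) (i : Int) : Int :=
  if i < 0 then i
  else if (PySem.List.pyGet? cs i).any (fun c => c ∈ [' ', '\t', '\r', '.']) then rskipLoop cs (i - 1)
  else i
termination_by (i + 1).toNat
decreasing_by omega

def rskip_space (content : String) (i : Int) : Int :=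
  if i < 0 ∨ (content.toList.length : Int) ≤ i then -1
  else rskipLoop content.toList i

-- ===== PORT B =====
-- s.rstrip(" \t\r.") on code points: drop the trailing run of skip characters (exact for these ASCII chars)
def rstripSkip (cs : List Char) : List Char :=
  (cs.reverse.dropWhile (fun c => decide (c ∈ [' ', '\t', '\r', '.']))).reverse

def rskip_space_alt (content : String) (i : Int) : Int :=
  if i < 0 ∨ (content.toList.length : Int) ≤ i then -1
  else ((rstripSkip (PySem.Chars.slice content.toList none (some (i + 1)))).length : Int) - 1

-- ===== PRECONDITION & SPEC =====
def Spec_rskip_space (content : String) (i : Int) (out : Int) : Prop := out = rskip_space_alt content i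
instance (content : String) (i : Int) (out : Int) : Decidable (Spec_rskip_space content i out) := by unfold Spec_rskip_space; infer_instance

-- ===== CLAIM (what is proved, stated in full; the proofs are below) =====
def Claim_equal_rskip_space : Prop := ∀ (content : String) (i : Int), Dom_rskip_space content i → Spec_rskip_space content i (rskip_space content i)

-- ===== LEMMAS AND PROOFS =====

lemma rskipLoop_eq (cs : List Char) (j : Nat) (hj : j < cs.length) :
    rskipLoop cs (j : Int) =
      (((cs.take (j + 1)).reverse.dropWhile (fun c => decide (c ∈ [' ', '\t', '\r', '.']))).length : Int) - 1 := by
  induction j with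
  | zero =>
      rw [rskipLoop, if_neg (by omega : ¬ ((0 : Nat) : Int) < 0)]
      have hget : PySem.List.pyGet? cs ((0 : Nat) : Int) = some cs[0] := by
        rw [PySem.List.pyGet?_natCast]; exact List.getElem?_eq_getElem hj
      have htake : cs.take (0 + 1) = [cs[0]] := by
        rw [List.take_one]; simp [List.head?_eq_getElem?, List.getElem?_eq_getElem hj]
      rw [hget, htake]
      simp only [Option.any_some, decide_eq_true_eq]
      by_cases hc : cs[0] ∈ [' ', '\t', '\r', '.']
      · rw [if_pos hc, rskipLoop, if_pos (by omega : ((0 : Nat) : Int) - 1 < 0)]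
        simp only [List.reverse_singleton, List.dropWhile_cons, decide_eq_true hc, if_true,
          List.dropWhile_nil, List.length_nil]
      · rw [if_neg hc]
        simp only [List.reverse_singleton, List.dropWhile_cons, decide_eq_false hc,
          Bool.false_eq_true, if_false, List.length_cons, List.length_nil]
        omega
  | succ j ih =>
      have hlt : j < cs.length := by omega
      rw [rskipLoop, if_neg (by push_cast; omega : ¬ ((j + 1 : Nat) : Int) < 0)]
      have hget : PySem.List.pyGet? cs ((j + 1 : Nat) : Int) = some cs[j + 1] := by
        rw [PySem.List.pyGet?_natCast]; exact List.getElem?_eq_getElem hj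
      have htake : cs.take (j + 1 + 1) = cs.take (j + 1) ++ [cs[j + 1]] := by
        rw [List.take_add_one]
        simp [List.getElem?_eq_getElem hj]
      rw [hget, htake]
      simp only [Option.any_some, decide_eq_true_eq]
      by_cases hc : cs[j + 1] ∈ [' ', '\t', '\r', '.']
      · rw [if_pos hc]
        have hm1 : ((j + 1 : Nat) : Int) - 1 = (j : Int) := by push_cast; ring
        rw [hm1, ih hlt]
        simp only [List.reverse_append, List.reverse_singleton, List.singleton_append,
          List.dropWhile_cons, decide_eq_true hc, if_true]
      · rw [if_neg hc]
        simp only [List.reverse_append, List.reverse_singleton, List.singleton_append,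
          List.dropWhile_cons, decide_eq_false hc, Bool.false_eq_true, if_false,
          List.length_cons, List.length_reverse, List.length_take]
        have : min (j + 1) cs.length = j + 1 := by omega
        rw [this]; push_cast; ring

-- ===== VERDICT (by name: the statement is the Claim_ definition above) =====
theorem rskip_space_spec : Claim_equal_rskip_space := by
  intro content i _
  unfold Spec_rskip_space rskip_space rskip_space_alt
  by_cases hg : i < 0 ∨ (content.toList.length : Int) ≤ i
  · rw [if_pos hg, if_pos hg]
  · rw [if_neg hg, if_neg hg]
    push_neg at hg
    obtain ⟨h0, hl⟩ := hg
    obtain ⟨j, rfl⟩ : ∃ j : Nat, (j : Int) = i := ⟨i.toNat, Int.toNat_of_nonneg h0⟩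
    have hj : j < content.toList.length := by exact_mod_cast hl
    rw [rskipLoop_eq content.toList j hj]
    have : (j : Int) + 1 = ((j + 1 : Nat) : Int) := by push_cast; ring
    rw [this, PySem.Chars.slice_eq_listSlice, PySem.List.slice_to_natCast]
    simp [rstripSkip]
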